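-- pv_equiv track=rewrite | github.com/Amir-Shahein/cluster-scan | pwm_scan/statMechModel.py | restrict_to_possible_states
-- ===== SOURCE A (Python) =====
-- def restrict_to_possible_states(allCombosList, eachSitesOverlaps):
--     """
--
--
--     Parameters
--     ----------
--     allCombosList : list of tuples
--         Powerset (all possible combinations) of the sites in an overlapping cluster.
--     eachSitesOverlaps : list of lists
--         List of lists of which sites overlap with each other.
--
--     Returns
--     -------
--     possibleStates : List of lists
--         This method processes the allCombosList into a list of possible states (no overlapping sites in a given state),
--         using the lists sites that overlap with each given site (eachSitesOverlaps)
--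
--     """
--
--     possibleStates = [] #list of possible states (sites that con be concurrently occupied in the ovlp cluster)
--
--
--     #This 4th order nested for loop looks complicated but it's actually relatively simple
--
--     for j in range(len(allCombosList)): # for each tuple j in allCombosList
--
--         keep = True # start by assuming we will keep this state (i.e. all of the sites in the list can be occupied at once)
--
--         for x in range(len(eachSitesOverlaps)): # for each list x of overlapping sites
--
--             applicable=False # if the site is present in the j state, to which list x actually corresponds
--             overlapping=False # assuming the site corresponding to list x is present, is one of the sites that overlaps with it present?
--
--             for k in range(len(allCombosList[j])): # for a given site k in state j
--
--                 for n in range(len(eachSitesOverlaps[x])): # iterate through the sites in list x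
--
--                     if allCombosList[j][k] == x and applicable == False: # is the site present in state j, to which the list X (of its overlapping sites) actually corresponds?
--                         applicable = True
--
--                     if allCombosList[j][k] == eachSitesOverlaps[x][n] and overlapping == False: # if a site in state j is found in list x
--                         overlapping=True
--
--                     if applicable == True and overlapping == True: # if both conditions are met at any point, the state is invalid, break out of loop
--                         keep = False
--                         break
--
--             if applicable == True and overlapping == True: # if the state is invalid at any point, break out of loop
--                 break
--
--         if keep == True: #if keep is still true, that state is possible, append it to possibleStates, otherwise move to the next state j+1
--             possibleStates.append(allCombosList[j])
--
--     return possibleStates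
-- ===== SOURCE B (Python) =====
-- def restrict_to_possible_states(allCombosList, eachSitesOverlaps):
--     n = len(eachSitesOverlaps)
--     possibleStates = []
--     for combo in allCombosList:
--         comboSet = set(combo)
--         if not any(0 <= v < n and not comboSet.isdisjoint(eachSitesOverlaps[v])
--                    for v in combo):
--             possibleStates.append(combo)
--     return possibleStates
-- ===== Notes on version B (the rewrite author's own statement) =====
-- stated objective: faster
-- what changed: Replaces A's quadruply nested sweep (every overlap list x, re-scanned against every site of the combo with applicable/overlapping flag machinery) by a direct per-combo test: for each site v present in the combo (guarded 0 <= v < len), check whether the combo's set intersects eachSitesOverlaps[v].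
import Mathlib
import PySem

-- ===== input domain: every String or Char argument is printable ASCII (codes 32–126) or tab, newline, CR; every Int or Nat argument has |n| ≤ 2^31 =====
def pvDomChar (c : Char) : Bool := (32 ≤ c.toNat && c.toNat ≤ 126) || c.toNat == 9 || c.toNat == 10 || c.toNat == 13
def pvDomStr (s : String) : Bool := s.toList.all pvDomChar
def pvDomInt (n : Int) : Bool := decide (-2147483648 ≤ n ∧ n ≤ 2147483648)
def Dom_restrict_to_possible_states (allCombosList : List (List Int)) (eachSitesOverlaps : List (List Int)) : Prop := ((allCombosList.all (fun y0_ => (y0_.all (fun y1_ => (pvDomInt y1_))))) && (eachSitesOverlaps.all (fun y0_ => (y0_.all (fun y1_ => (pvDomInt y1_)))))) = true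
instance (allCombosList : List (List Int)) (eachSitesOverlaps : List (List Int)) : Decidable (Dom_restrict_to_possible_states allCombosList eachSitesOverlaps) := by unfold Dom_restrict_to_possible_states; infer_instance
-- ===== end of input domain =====

-- B replaces A's quadruply nested flag-machinery sweep over all overlap lists by a direct
-- per-combo test driven by the combo's own sites (faster in a timing run; same return value).

-- ===== PORT A =====
-- the innermost 'for n' loop over eachSitesOverlaps[x]; state (applicable, overlapping, keep); break modelled by stopping the recursion
def pvLoopN (cjk x : Int) (ovx : List Int) (a o keep : Bool) : Bool × Bool × Bool :=
  match ovx with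
  | [] => (a, o, keep)
  | e :: rest =>
    let a' := if cjk = x ∧ a = false then true else a
    let o' := if cjk = e ∧ o = false then true else o
    if a' = true ∧ o' = true then (a', o', false)
    else pvLoopN cjk x rest a' o' keep

-- the 'for k' loop over the sites of combo j
def pvLoopK (c : List Int) (x : Int) (ovx : List Int) (a o keep : Bool) : Bool × Bool × Bool :=
  match c with
  | [] => (a, o, keep)
  | cjk :: rest =>
    let r := pvLoopN cjk x ovx a o keep
    pvLoopK rest x ovx r.1 r.2.1 r.2.2

-- the 'for x' loop over eachSitesOverlaps (x is the running index); break modelled by returning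
def pvLoopX (ov : List (List Int)) (x : Int) (c : List Int) (keep : Bool) : Bool :=
  match ov with
  | [] => keep
  | ovx :: rest =>
    let r := pvLoopK c x ovx false false keep
    if r.1 = true ∧ r.2.1 = true then r.2.2
    else pvLoopX rest (x + 1) c r.2.2

def restrict_to_possible_states (allCombosList : List (List Int)) (eachSitesOverlaps : List (List Int)) : List (List Int) :=
  allCombosList.foldl
    (fun acc c => if pvLoopX eachSitesOverlaps 0 c true = true then acc ++ [c] else acc) []

-- ===== PORT B =====
-- 'any(0 <= v < n and not comboSet.isdisjoint(eachSitesOverlaps[v]) for v in combo)'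
def pvComboInvalid (eachSitesOverlaps : List (List Int)) (c : List Int) : Bool :=
  let comboSet : PySem.Set Int := PySem.Set.ofList c
  c.any (fun v =>
    decide (0 ≤ v) && decide (v < (eachSitesOverlaps.length : Int)) &&
    !(PySem.Set.isdisjoint comboSet (eachSitesOverlaps.getD v.toNat [])))

def restrict_to_possible_states_alt (allCombosList : List (List Int)) (eachSitesOverlaps : List (List Int)) : List (List Int) :=
  allCombosList.filter (fun c => !(pvComboInvalid eachSitesOverlaps c))

-- ===== PRECONDITION & SPEC =====
def Spec_restrict_to_possible_states (allCombosList : List (List Int)) (eachSitesOverlaps : List (List Int)) (out : List (List Int)) : Prop := out = restrict_to_possible_states_alt allCombosList eachSitesOverlaps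
instance (allCombosList : List (List Int)) (eachSitesOverlaps : List (List Int)) (out : List (List Int)) : Decidable (Spec_restrict_to_possible_states allCombosList eachSitesOverlaps out) := by unfold Spec_restrict_to_possible_states; infer_instance

-- ===== CLAIM (what is proved, stated in full; the proofs are below) =====
def Claim_equal_restrict_to_possible_states : Prop := ∀ (allCombosList : List (List Int)) (eachSitesOverlaps : List (List Int)), Dom_restrict_to_possible_states allCombosList eachSitesOverlaps → Spec_restrict_to_possible_states allCombosList eachSitesOverlaps (restrict_to_possible_states allCombosList eachSitesOverlaps)

-- ===== LEMMAS AND PROOFS =====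

-- per-list "this overlap list invalidates combo c" test
def pvBadB (ovx : List Int) (x : Int) (c : List Int) : Bool :=
  c.contains x && c.any (fun s => ovx.contains s)

-- indexed any over the overlap lists starting at index x
def pvAnyBad (ov : List (List Int)) (x : Int) (c : List Int) : Bool :=
  match ov with
  | [] => false
  | ovx :: rest => pvBadB ovx x c || pvAnyBad rest (x + 1) c

theorem pvLoopN_spec (cjk x : Int) (ovx : List Int) (a o keep : Bool) :
    pvLoopN cjk x ovx a o keep =
      if ovx = [] then (a, o, keep)
      else if (a || decide (cjk = x)) && (o || ovx.contains cjk) then (true, true, false)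
      else (a || decide (cjk = x), o || ovx.contains cjk, keep) := by
  induction ovx generalizing a o with
  | nil => simp [pvLoopN]
  | cons e rest ih =>
    simp only [pvLoopN, ih]
    by_cases hx : cjk = x <;> by_cases he : cjk = e <;>
      cases a <;> cases o <;>
      simp_all

theorem pvLoopK_spec (c : List Int) (x : Int) (ovx : List Int) (a o keep : Bool)
    (h : a = true → o = true → keep = false) :
    pvLoopK c x ovx a o keep =
      if ovx = [] then (a, o, keep)
      else if (a || c.contains x) && (o || c.any (fun s => ovx.contains s)) then (true, true, false)
      else (a || c.contains x, o || c.any (fun s => ovx.contains s), keep) := by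
  induction c generalizing a o keep with
  | nil =>
    cases a <;> cases o <;> simp_all [pvLoopK]
  | cons cjk rest ih =>
    simp only [pvLoopK, pvLoopN_spec]
    by_cases hε : ovx = []
    · subst hε
      simp only [if_true]
      rw [ih a o keep h]
      simp
    · simp only [if_neg hε]
      by_cases hb : ((a || decide (cjk = x)) && (o || ovx.contains cjk)) = true
      · simp only [if_pos hb]
        rw [ih true true false (by simp)]
        simp only [if_neg hε, List.contains_cons, List.any_cons]
        have hcx : (cjk = x) ↔ (x = cjk) := eq_comm
        cases a <;> cases o <;> simp_all [hcx]
      · simp only [if_neg hb]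
        rw [ih (a || decide (cjk = x)) (o || ovx.contains cjk) keep
          (fun h1 h2 => absurd (by rw [h1, h2]; rfl) hb)]
        have hswap : ((x == cjk) : Bool) = decide (cjk = x) := by
          by_cases hx2 : cjk = x
          · simp [hx2]
          · have hx3 : ¬ x = cjk := fun hh => hx2 hh.symm
            simp [hx2, hx3]
        simp only [if_neg hε, List.contains_cons, List.any_cons, hswap, Bool.or_assoc]

theorem pvBadB_nil (x : Int) (c : List Int) : pvBadB [] x c = false := by
  simp [pvBadB]

theorem pvLoopX_spec (ov : List (List Int)) (x : Int) (c : List Int) (keep : Bool) :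
    pvLoopX ov x c keep = (!(pvAnyBad ov x c) && keep) := by
  induction ov generalizing x keep with
  | nil => simp [pvLoopX, pvAnyBad]
  | cons ovx rest ih =>
    simp only [pvLoopX, pvAnyBad]
    rw [pvLoopK_spec c x ovx false false keep (by simp)]
    by_cases hε : ovx = []
    · subst hε
      simp [pvBadB_nil, ih]
    · simp only [if_neg hε, Bool.false_or]
      by_cases hb : (c.contains x && c.any (fun s => ovx.contains s)) = true
      · have hp : x ∈ c ∧ ∃ s ∈ c, s ∈ ovx := by
          simpa [List.contains_eq_mem, List.any_eq_true] using hb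
        simp [pvBadB, hp]
      · have hp : ¬ (x ∈ c ∧ ∃ s ∈ c, s ∈ ovx) := by
          simpa [List.contains_eq_mem, List.any_eq_true] using hb
        have hbf : pvBadB ovx x c = false := by simpa [pvBadB] using hb
        simp [hbf, hp, ih]

-- propositional reading of pvAnyBad
theorem pvAnyBad_iff (ov : List (List Int)) (x : Int) (c : List Int) :
    pvAnyBad ov x c = true ↔
      ∃ i : Nat, i < ov.length ∧ (x + i) ∈ c ∧ ∃ s ∈ c, s ∈ ov.getD i [] := by
  induction ov generalizing x with
  | nil => simp [pvAnyBad]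
  | cons ovx rest ih =>
    simp only [pvAnyBad, Bool.or_eq_true, ih, pvBadB, Bool.and_eq_true, List.contains_eq_mem,
      List.any_eq_true, decide_eq_true_eq]
    constructor
    · rintro (⟨h1, h2⟩ | ⟨i, hi, hx, hs⟩)
      · exact ⟨0, by simp, by simpa using h1, by simpa using h2⟩
      · exact ⟨i + 1, by simpa using hi, by rw [show x + (↑i + 1 : Nat) = (x + 1) + i by push_cast; ring]; exact hx, by simpa using hs⟩
    · rintro ⟨i, hi, hx, hs⟩
      cases i with
      | zero => exact Or.inl ⟨by simpa using hx, by simpa using hs⟩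
      | succ i =>
        refine Or.inr ⟨i, by simpa using hi, ?_, by simpa using hs⟩
        rw [show (x + 1) + (i : Int) = x + (↑i + 1 : Nat) by push_cast; ring]
        exact hx

-- B's per-combo test computes the same predicate as A's flag machinery
theorem pvComboInvalid_eq (ov : List (List Int)) (c : List Int) :
    pvComboInvalid ov c = pvAnyBad ov 0 c := by
  have hB : pvComboInvalid ov c = true ↔
      ∃ v ∈ c, 0 ≤ v ∧ v < (ov.length : Int) ∧ ∃ e ∈ c, e ∈ ov.getD v.toNat [] := by
    simp only [pvComboInvalid, List.any_eq_true, Bool.and_eq_true, decide_eq_true_eq,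
      Bool.not_eq_true']
    constructor
    · rintro ⟨v, hv, ⟨h0, hn⟩, hd⟩
      have hne : ¬ (PySem.Set.isdisjoint (PySem.Set.ofList c) (ov.getD v.toNat []) = true) :=
        fun h => by rw [Bool.eq_false_iff] at hd; exact hd h
      rw [PySem.Set.isdisjoint_iff] at hne
      push Not at hne
      obtain ⟨e, he, hm⟩ := hne
      exact ⟨v, hv, h0, hn, e, (PySem.Set.mem_ofList c e).mp he, hm⟩
    · rintro ⟨v, hv, h0, hn, e, hec, he⟩
      refine ⟨v, hv, ⟨h0, hn⟩, ?_⟩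
      have hne : ¬ (PySem.Set.isdisjoint (PySem.Set.ofList c) (ov.getD v.toNat []) = true) := by
        rw [PySem.Set.isdisjoint_iff]
        push Not
        exact ⟨e, (PySem.Set.mem_ofList c e).mpr hec, he⟩
      exact Bool.eq_false_iff.mpr hne
  have hA := pvAnyBad_iff ov 0 c
  by_cases hb : pvComboInvalid ov c = true
  · obtain ⟨v, hv, h0, hn, e, hec, he⟩ := hB.mp hb
    rw [hb]
    symm
    refine hA.mpr ⟨v.toNat, by omega, ?_, e, hec, he⟩
    simpa [Int.toNat_of_nonneg h0] using hv
  · have hb' : pvComboInvalid ov c = false := by simpa using hb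
    cases ha : pvAnyBad ov 0 c with
    | true =>
      exfalso
      obtain ⟨i, hi, hx, s, hs, hsi⟩ := hA.mp ha
      exact hb (hB.mpr ⟨(i : Int), by simpa using hx, by positivity,
        by exact_mod_cast hi, s, hs, by simpa using hsi⟩)
    | false => simp [hb']

theorem foldl_filter (ov : List (List Int)) (l acc : List (List Int)) :
    l.foldl (fun acc c => if pvLoopX ov 0 c true = true then acc ++ [c] else acc) acc
      = acc ++ l.filter (fun c => !(pvComboInvalid ov c)) := by
  induction l generalizing acc with
  | nil => simp
  | cons c rest ih =>
    simp only [List.foldl_cons, List.filter_cons, pvLoopX_spec, pvComboInvalid_eq,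
      Bool.and_true] at ih ⊢
    cases h : pvAnyBad ov 0 c with
    | false => simpa [h] using ih (acc ++ [c])
    | true => simpa [h] using ih acc

-- ===== VERDICT (by name: the statement is the Claim_ definition above) =====
theorem restrict_to_possible_states_spec : Claim_equal_restrict_to_possible_states := by
  intro A E _
  unfold Spec_restrict_to_possible_states restrict_to_possible_states restrict_to_possible_states_alt
  simpa using foldl_filter E A []
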